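-- pv_equiv track=rewrite | github.com/fuentesmarlon/Othello-AI | client.py | human_board
-- ===== SOURCE A (Python) =====
-- import math
--
-- def human_board(board):
--     tileRep = ['_', 'X', 'O']
--     N = 8
--     result = '    A  B  C  D  E  F  G  H'
--     for i in range(len(board)):
--         if i % N == 0:
--             result += '\n\n ' + str(int(math.floor(i / N)) + 1) + ' '
--         result += ' ' + tileRep[board[i]] + ' '
--     return result
-- ===== SOURCE B (Python) =====
-- def human_board(board):
--     tileRep = ['_', 'X', 'O']
--     rows = [board[i:i + 8] for i in range(0, len(board), 8)]
--     parts = ['    A  B  C  D  E  F  G  H']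
--     for r, row in enumerate(rows, 1):
--         parts.append('\n\n ' + str(r) + ' ' + ''.join(' ' + tileRep[c] + ' ' for c in row))
--     return ''.join(parts)
-- ===== Notes on version B (the rewrite author's own statement) =====
-- stated objective: alternative
-- what changed: B replaces A's single index-driven loop with i%8/i//8 header bookkeeping by chunking the board into rows of 8, then emitting one header-plus-joined-tiles string per enumerated row and joining the parts.
-- outside the precondition, e.g. on human_board([3]): A raises IndexError, B raises IndexError
import Mathlib
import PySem

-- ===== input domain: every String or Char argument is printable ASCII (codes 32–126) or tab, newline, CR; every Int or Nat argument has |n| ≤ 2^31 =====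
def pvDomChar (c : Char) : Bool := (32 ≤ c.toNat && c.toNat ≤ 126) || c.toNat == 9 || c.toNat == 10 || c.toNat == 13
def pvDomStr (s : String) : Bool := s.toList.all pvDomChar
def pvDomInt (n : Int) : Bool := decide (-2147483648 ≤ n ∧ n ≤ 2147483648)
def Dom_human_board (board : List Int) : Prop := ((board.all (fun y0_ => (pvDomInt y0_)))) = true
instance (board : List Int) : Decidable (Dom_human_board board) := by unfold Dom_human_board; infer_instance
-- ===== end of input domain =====

-- B formats the board by rows-of-8 chunking with per-row joins instead of A's index-arithmetic loop (objective: alternative decomposition).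

-- ===== PORT A =====
-- int(math.floor(i / 8)) is ported as floor division by 8: i is a nonnegative index < 2^31, where float division and floor are exact.
def human_board (board : List Int) : String :=
  let tileRep : List String := ["_", "X", "O"]
  (PySem.List.pyRange 0 (board.length : Int) 1).foldl
    (fun result i =>
      let result :=
        if PySem.Int.mod i 8 = 0 then
          result ++ "\n\n " ++ PySem.Int.toStr (PySem.Int.floordiv i 8 + 1) ++ " "
        else result
      result ++ " " ++ PySem.List.pyGetD tileRep (PySem.List.pyGetD board i 0) "?" ++ " ")
    "    A  B  C  D  E  F  G  H"

-- ===== PORT B =====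
def pvRows8 : List Int → List (List Int)
  | [] => []
  | x :: xs => ((x :: xs).take 8) :: pvRows8 ((x :: xs).drop 8)
  termination_by xs => xs.length
  decreasing_by simp

def human_board_alt (board : List Int) : String :=
  let tileRep : List String := ["_", "X", "O"]
  let rows := pvRows8 board
  PySem.Str.join "" ("    A  B  C  D  E  F  G  H" ::
    (PySem.List.enumerate rows 1).map (fun p =>
      "\n\n " ++ PySem.Int.toStr p.1 ++ " " ++
      PySem.Str.join "" (p.2.map (fun c => " " ++ PySem.List.pyGetD tileRep c "?" ++ " "))))

-- ===== PRECONDITION & SPEC =====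
-- Pre_ excludes boards containing a cell outside -3..2: there tileRep[board[i]] raises IndexError in Python (in A and in B alike).
def Pre_human_board (board : List Int) : Prop := ∀ c ∈ board, -3 ≤ c ∧ c < 3
instance (board : List Int) : Decidable (Pre_human_board board) := by unfold Pre_human_board; infer_instance
def pvWitness_human_board : List Int := [0, 1, 2, -1, -2, -3, 0, 0, 1]

def Spec_human_board (board : List Int) (out : String) : Prop := out = human_board_alt board
instance (board : List Int) (out : String) : Decidable (Spec_human_board board out) := by unfold Spec_human_board; infer_instance

-- ===== CLAIM (what is proved, stated in full; the proofs are below) =====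
def Claim_equal_human_board : Prop := ∀ (board : List Int), Dom_human_board board → Pre_human_board board → Spec_human_board board (human_board board)

-- ===== LEMMAS AND PROOFS =====

def pvTile (c : Int) : String := " " ++ PySem.List.pyGetD ["_", "X", "O"] c "?" ++ " "

def pvRowStr (p : Int × List Int) : String :=
  "\n\n " ++ PySem.Int.toStr p.1 ++ " " ++ PySem.Str.join "" (p.2.map pvTile)

def pvStepA (full : List Int) (result : String) (i : Int) : String :=
  (if PySem.Int.mod i 8 = 0 then
    result ++ "\n\n " ++ PySem.Int.toStr (PySem.Int.floordiv i 8 + 1) ++ " "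
  else result) ++ " " ++ PySem.List.pyGetD ["_", "X", "O"] (PySem.List.pyGetD full i 0) "?" ++ " "

def pvGo : List Int → Nat → String → String
  | [], _, acc => acc
  | c :: rest, pos, acc =>
      pvGo rest (pos + 1)
        ((if pos % 8 = 0 then
            acc ++ "\n\n " ++ PySem.Int.toStr (((pos / 8 : Nat) : Int) + 1) ++ " "
          else acc) ++ pvTile c)

lemma pvJoin_cons (s : String) (l : List String) :
    PySem.Str.join "" (s :: l) = s ++ PySem.Str.join "" l := by
  rw [← String.toList_inj]
  cases l <;>
    simp [PySem.Str.toList_join, PySem.Chars.join_cons_cons, PySem.Chars.join_nil,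
      PySem.Chars.join_singleton, String.toList_append]

lemma pvJoin_nil : PySem.Str.join "" ([] : List String) = "" := by decide

lemma human_board_eq_fold (board : List Int) :
    human_board board =
      (PySem.List.pyRange 0 (board.length : Int) 1).foldl (pvStepA board)
        "    A  B  C  D  E  F  G  H" := rfl

lemma human_board_alt_eq (board : List Int) :
    human_board_alt board =
      PySem.Str.join ""
        ("    A  B  C  D  E  F  G  H" :: (PySem.List.enumerate (pvRows8 board) 1).map pvRowStr) := rfl

lemma foldA (full : List Int) : ∀ (xs pre : List Int), pre ++ xs = full → ∀ acc : String,
    (PySem.List.pyRange (pre.length : Int) (full.length : Int) 1).foldl (pvStepA full) acc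
      = pvGo xs pre.length acc := by
  intro xs
  induction xs with
  | nil =>
    intro pre hpre acc
    rw [PySem.List.pyRange_one_eq_nil (by simp [← hpre])]
    simp [pvGo]
  | cons c rest ih =>
    intro pre hpre acc
    have hlt : (pre.length : Int) < (full.length : Int) := by
      rw [← hpre]; simp
    rw [PySem.List.pyRange_one_cons hlt]
    have hmod : PySem.Int.mod (pre.length : Int) 8 = ((pre.length % 8 : Nat) : Int) := by
      rw [PySem.Int.mod_eq_emod_of_pos (by norm_num)]; omega
    have hdiv : PySem.Int.floordiv (pre.length : Int) 8 = ((pre.length / 8 : Nat) : Int) := by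
      rw [PySem.Int.floordiv_eq_ediv_of_pos (by norm_num)]; omega
    have hget : PySem.List.pyGetD full (pre.length : Int) 0 = c := by
      rw [← hpre, PySem.List.pyGetD_eq_getElem _ _ (by positivity) (by simp)]
      simp
    have hstep : pvStepA full acc (pre.length : Int) =
        (if pre.length % 8 = 0 then
          acc ++ "\n\n " ++ PySem.Int.toStr (((pre.length / 8 : Nat) : Int) + 1) ++ " "
        else acc) ++ pvTile c := by
      simp only [pvStepA, pvTile, hmod, hdiv, hget, Nat.cast_eq_zero, String.append_assoc]
    have hlen : ((pre.length : Int) + 1) = (((pre ++ [c]).length : Nat) : Int) := by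
      simp
    rw [List.foldl_cons, hstep, pvGo, hlen, ih (pre ++ [c]) (by simp [← hpre]) _]
    simp

lemma pvGo_append (row : List Int) : ∀ (rest : List Int) (pos : Nat) (acc : String),
    (∀ j, j < row.length → (pos + j) % 8 ≠ 0) →
    pvGo (row ++ rest) pos acc
      = pvGo rest (pos + row.length) (acc ++ PySem.Str.join "" (row.map pvTile)) := by
  induction row with
  | nil =>
    intro rest pos acc _
    rw [List.map_nil, pvJoin_nil, String.append_empty]
    simp
  | cons c row' ih =>
    intro rest pos acc h
    have h0 : pos % 8 ≠ 0 := by simpa using h 0 (by simp)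
    have hlen : pos + 1 + row'.length = pos + (c :: row').length := by simp; omega
    rw [List.cons_append, pvGo, if_neg h0,
      ih rest (pos + 1) _ (fun j hj => by
        have := h (j + 1) (by simp; omega); omega),
      hlen, List.map_cons, pvJoin_cons, String.append_assoc]

lemma pvGo_chunks : ∀ (n : Nat) (board : List Int), board.length ≤ n → ∀ (r : Nat) (acc : String),
    pvGo board (8 * r) acc
      = acc ++ PySem.Str.join "" ((PySem.List.enumerate (pvRows8 board) ((r : Int) + 1)).map pvRowStr) := by
  intro n
  induction n with
  | zero =>
    intro board hb r acc
    have : board = [] := List.eq_nil_of_length_eq_zero (by omega)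
    subst this
    simp [pvGo, pvRows8, pvJoin_nil]
  | succ n ih =>
    intro board hb r acc
    cases board with
    | nil => simp [pvGo, pvRows8, pvJoin_nil]
    | cons c tl =>
      have hmod : 8 * r % 8 = 0 := by omega
      have hdiv : 8 * r / 8 = r := by omega
      rw [pvGo, if_pos hmod, hdiv]
      have htl : tl = tl.take 7 ++ tl.drop 7 := (List.take_append_drop 7 tl).symm
      conv_lhs => rw [htl]
      rw [pvGo_append _ _ _ _ (fun j hj => by
        simp [List.length_take] at hj; omega)]
      rw [pvRows8, List.take_succ_cons, List.drop_succ_cons, PySem.List.enumerate_cons,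
        List.map_cons, pvJoin_cons]
      by_cases h7 : tl.length ≤ 7
      · rw [List.drop_eq_nil_of_le h7] at *
        rw [show pvRows8 [] = [] by simp [pvRows8]]
        rw [pvGo]
        simp [pvRowStr, pvJoin_cons, pvJoin_nil, String.append_assoc]
      · have h7len : (tl.take 7).length = 7 := by simp [List.length_take]; omega
        rw [h7len, show 8 * r + 1 + 7 = 8 * (r + 1) by omega,
          ih (tl.drop 7) (by simp at hb ⊢; omega) (r + 1)]
        simp [pvRowStr, pvJoin_cons, String.append_assoc]

-- ===== VERDICT (by name: the statement is the Claim_ definition above) =====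
theorem human_board_spec : Claim_equal_human_board := by
  intro board _ _
  unfold Spec_human_board
  rw [human_board_eq_fold, human_board_alt_eq,
    show ((0 : Int) = ((([] : List Int).length : Nat) : Int)) by simp,
    foldA board board [] rfl,
    show ([] : List Int).length = 8 * 0 by simp,
    pvGo_chunks board.length board le_rfl 0, pvJoin_cons]
  norm_num
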